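-- pv_equiv track=rewrite | github.com/neupanerabeen/magento-parsers | category.py | update_category
-- ===== SOURCE A (Python) =====
-- cat_replace = {'POW/MIA':'POW##MIA', 'Holiday & Seasonal Flags/Banners':'Holiday & Seasonal Flags##Banners'}
--
-- def update_category(row):
-- 	categories = str(row["categories"])
-- 	for cat_rep in cat_replace:
-- 		if cat_rep in categories:
-- 			categories = categories.replace(cat_rep, cat_replace[cat_rep])
-- 	newCat = ""
-- 	categories= categories.split(',')
-- 	for category in categories:
-- 		newCat+= "Default Category/"+category+","
-- 	newCat = newCat.strip(",")
-- 	return newCat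
-- ===== SOURCE B (Python) =====
-- cat_replace = {'POW/MIA':'POW##MIA', 'Holiday & Seasonal Flags/Banners':'Holiday & Seasonal Flags##Banners'}
--
-- def update_category(row):
-- 	categories = str(row["categories"])
-- 	for cat_rep in cat_replace:
-- 		if cat_rep in categories:
-- 			categories = categories.replace(cat_rep, cat_replace[cat_rep])
-- 	return "Default Category/" + categories.replace(",", ",Default Category/")
-- ===== Notes on version B (the rewrite author's own statement) =====
-- stated objective: simpler
-- what changed: Replaces the split-on-comma loop that concatenates 'Default Category/'+category+',' and then strips the trailing comma with a single prefix plus one replace(',', ',Default Category/') pass that builds no intermediate list.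
import Mathlib
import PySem

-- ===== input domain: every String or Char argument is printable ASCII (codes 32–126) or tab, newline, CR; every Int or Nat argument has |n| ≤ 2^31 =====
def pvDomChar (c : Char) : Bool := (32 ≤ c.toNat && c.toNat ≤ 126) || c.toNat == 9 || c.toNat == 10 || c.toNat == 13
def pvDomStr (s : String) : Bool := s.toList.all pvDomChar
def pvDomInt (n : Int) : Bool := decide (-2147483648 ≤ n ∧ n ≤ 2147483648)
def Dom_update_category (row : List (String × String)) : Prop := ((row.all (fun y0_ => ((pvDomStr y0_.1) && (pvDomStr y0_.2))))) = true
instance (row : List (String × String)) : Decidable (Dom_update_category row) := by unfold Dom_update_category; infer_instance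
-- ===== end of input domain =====

-- B replaces A's split-on-comma loop (concatenate 'Default Category/'+category+',' then strip the
-- trailing comma) by one prefix plus a single replace(',', ',Default Category/') pass: simpler, no
-- intermediate list. Equivalence is proved on every row whose dict has a "categories" key (Pre_).

-- ===== PORT A =====
-- the module constant cat_replace, as (key, value) pairs in insertion order
def pvCatReplace : List (List Char × List Char) :=
  [("POW/MIA".toList, "POW##MIA".toList),
   ("Holiday & Seasonal Flags/Banners".toList, "Holiday & Seasonal Flags##Banners".toList)]

-- 'for cat_rep in cat_replace: if cat_rep in categories: categories = categories.replace(...)';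
-- this loop appears verbatim in BOTH Pythons, so both ports share it
def pvApplyCatReplace (cs : List Char) : List Char :=
  pvCatReplace.foldl
    (fun s kv => if PySem.Chars.isIn kv.1 s then PySem.Chars.replace s kv.1 kv.2 else s) cs

def pvDefCat : List Char := "Default Category/".toList

def update_category (row : List (String × String)) : String :=
  match (PySem.Dict.mk row).get? "categories" with
  | none => ""            -- KeyError in Python; excluded by Pre_update_category
  | some s =>
    let categories := pvApplyCatReplace s.toList   -- str(...) on a str is the identity
    let pieces := PySem.Chars.splitOn categories [',']          -- categories.split(',')
    let newCat := pieces.foldl (fun acc c => acc ++ pvDefCat ++ c ++ [',']) ([] : List Char)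
    String.ofList (PySem.Chars.stripChars newCat [','])         -- newCat.strip(",")

-- ===== PORT B =====
def update_category_alt (row : List (String × String)) : String :=
  match (PySem.Dict.mk row).get? "categories" with
  | none => ""            -- KeyError in Python; excluded by Pre_update_category
  | some s =>
    let categories := pvApplyCatReplace s.toList
    String.ofList (pvDefCat ++ PySem.Chars.replace categories [','] (',' :: pvDefCat))

-- ===== PRECONDITION & SPEC =====
-- Pre_ excludes only rows without a "categories" key, on which Python A raises KeyError
def Pre_update_category (row : List (String × String)) : Prop :=
  (PySem.Dict.mk row).contains "categories" = true
instance (row : List (String × String)) : Decidable (Pre_update_category row) := by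
  unfold Pre_update_category; infer_instance

def pvWitness_update_category : (List (String × String)) := [("categories", "POW/MIA,Toys")]

def Spec_update_category (row : List (String × String)) (out : String) : Prop := out = update_category_alt row
instance (row : List (String × String)) (out : String) : Decidable (Spec_update_category row out) := by unfold Spec_update_category; infer_instance

-- ===== CLAIM (what is proved, stated in full; the proofs are below) =====
def Claim_equal_update_category : Prop := ∀ (row : List (String × String)), Dom_update_category row → Pre_update_category row → Spec_update_category row (update_category row)

-- ===== LEMMAS AND PROOFS =====

-- split of a char list at ',': (first piece, remaining pieces)
def pvSC : List Char → List Char × List (List Char)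
  | [] => ([], [])
  | c :: t =>
    let r := pvSC t
    if c = ',' then ([], r.1 :: r.2) else (c :: r.1, r.2)

-- single-character replace, piece by piece
def pvRepl (new : List Char) : List Char → List Char
  | [] => []
  | c :: t => (if c = ',' then new else [c]) ++ pvRepl new t

theorem pvReplace_go_char (new : List Char) :
    ∀ (fuel : Nat) (t acc : List Char), t.length ≤ fuel →
      PySem.Chars.replace.go [','] new fuel t acc = acc.reverse ++ pvRepl new t := by
  intro fuel
  induction fuel with
  | zero =>
    intro t acc h
    cases t with
    | nil => simp [PySem.Chars.replace.go, pvRepl]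
    | cons c t => simp at h
  | succ f ih =>
    intro t acc h
    cases t with
    | nil => simp [PySem.Chars.replace.go, pvRepl]
    | cons c t =>
      rw [PySem.Chars.replace.go]
      by_cases hc : c = ','
      · subst hc
        have hp : List.isPrefixOf [','] (',' :: t) = true := by
          simp [List.isPrefixOf]
        simp only [hp, if_pos]
        rw [show List.drop (List.length [',']) (',' :: t) = t from rfl]
        rw [ih t (new.reverse ++ acc) (by simpa using Nat.le_of_succ_le_succ (by simpa using h))]
        simp [pvRepl]
      · have hp : List.isPrefixOf [','] (c :: t) = false := by
          simp [List.isPrefixOf]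
          exact fun hh => hc hh.symm
        simp only [hp, Bool.false_eq_true, if_neg, not_false_iff]
        rw [ih t (c :: acc) (by simpa using Nat.le_of_succ_le_succ (by simpa using h))]
        simp [pvRepl, hc]

theorem pvReplace_char (new t : List Char) :
    PySem.Chars.replace t [','] new = pvRepl new t := by
  rw [PySem.Chars.replace, if_neg (by simp)]
  simpa using pvReplace_go_char new t.length t []

theorem pvSplitOn_go_char :
    ∀ (fuel : Nat) (t cur : List Char) (acc : List (List Char)), t.length < fuel →
      PySem.Chars.splitOn.go [','] fuel t cur acc
        = acc.reverse ++ ((cur.reverse ++ (pvSC t).1) :: (pvSC t).2) := by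
  intro fuel
  induction fuel with
  | zero => intro t cur acc h; simp at h
  | succ f ih =>
    intro t cur acc h
    cases t with
    | nil => simp [PySem.Chars.splitOn.go, pvSC]
    | cons c t =>
      rw [PySem.Chars.splitOn.go]
      by_cases hc : c = ','
      · subst hc
        have hp : List.isPrefixOf [','] (',' :: t) = true := by
          simp [List.isPrefixOf]
        simp only [hp, if_pos]
        rw [show List.drop (List.length [',']) (',' :: t) = t from rfl]
        rw [ih t [] ((List.reverse cur) :: acc) (by simpa using Nat.lt_of_succ_lt_succ (by simpa using h))]
        simp [pvSC]
      · have hp : List.isPrefixOf [','] (c :: t) = false := by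
          simp [List.isPrefixOf]
          exact fun hh => hc hh.symm
        simp only [hp, Bool.false_eq_true, if_neg, not_false_iff]
        rw [ih t (c :: cur) acc (by simpa using Nat.lt_of_succ_lt_succ (by simpa using h))]
        simp [pvSC, hc]

theorem pvSplitOn_char (t : List Char) :
    PySem.Chars.splitOn t [','] = (pvSC t).1 :: (pvSC t).2 := by
  rw [PySem.Chars.splitOn]
  simpa using pvSplitOn_go_char (t.length + 1) t [] [] (by omega)

-- pvRepl in terms of the split pieces
theorem pvRepl_eq_sC (new t : List Char) :
    pvRepl new t = (pvSC t).1 ++ ((pvSC t).2.map (fun q => new ++ q)).flatten := by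
  induction t with
  | nil => simp [pvRepl, pvSC]
  | cons c t ih =>
    by_cases hc : c = ','
    · subst hc; simp [pvRepl, pvSC, ih]
    · simp [pvRepl, pvSC, hc, ih]

-- A's concatenation over the pieces is B's string followed by one trailing comma
theorem pvFlatten_pieces (pre : List Char) :
    ∀ (ps : List (List Char)) (p : List Char),
      List.flatMap (fun q => pre ++ (q ++ [','])) (p :: ps)
        = (pre ++ (p ++ ((ps.map (fun q => (',' :: pre) ++ q)).flatten))) ++ [','] := by
  intro ps
  induction ps with
  | nil => intro p; simp
  | cons q qs ih =>
    intro p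
    rw [List.flatMap_cons, ih q]
    simp [List.append_assoc]

-- "ends with a char other than ','" is preserved by appending pvRepl (',' :: pvDefCat) t
theorem pvEndsOk_append (t : List Char) :
    ∀ (pre' : List Char), (∃ ys z, pre' = ys ++ [z] ∧ z ≠ ',') →
      ∃ ys z, pre' ++ pvRepl (',' :: pvDefCat) t = ys ++ [z] ∧ z ≠ ',' := by
  induction t with
  | nil => intro pre' h; simpa [pvRepl] using h
  | cons c t ih =>
    intro pre' h
    have : pre' ++ pvRepl (',' :: pvDefCat) (c :: t)
        = (pre' ++ (if c = ',' then (',' :: pvDefCat) else [c])) ++ pvRepl (',' :: pvDefCat) t := by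
      simp [pvRepl]
    rw [this]
    apply ih
    by_cases hc : c = ','
    · subst hc
      refine ⟨pre' ++ (',' :: "Default Category".toList), '/', ?_, by decide⟩
      simp [pvDefCat]
    · exact ⟨pre', c, by simp [hc], hc⟩

-- strip(",") removes exactly the trailing comma when the string starts and ends with non-commas
theorem pvStrip_append_comma (X : List Char)
    (hh : ∀ c, X.head? = some c → c ≠ ',')
    (he : ∃ ys z, X = ys ++ [z] ∧ z ≠ ',') :
    PySem.Chars.stripChars (X ++ [',']) [','] = X := by
  obtain ⟨ys, z, hX, hz⟩ := he
  have hne : X ≠ [] := by rw [hX]; simp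
  obtain ⟨c0, X', hX0⟩ := List.exists_cons_of_ne_nil hne
  have hc0 : c0 ≠ ',' := hh c0 (by rw [hX0]; rfl)
  rw [PySem.Chars.stripChars]
  have h1 : List.dropWhile (fun c => List.contains [','] c) (X ++ [','])
      = X ++ [','] := by
    rw [hX0, List.cons_append, List.dropWhile_cons_of_neg (by simp [hc0])]
  rw [h1]
  have h2 : (X ++ [',']).reverse = ',' :: X.reverse := by simp
  rw [h2, List.dropWhile_cons_of_pos (by simp)]

  have h3 : X.reverse = z :: ys.reverse := by rw [hX]; simp
  rw [h3, List.dropWhile_cons_of_neg (by simp [hz])]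
  rw [← h3]
  simp

-- the core fact, for an arbitrary character list
theorem pvCore (cs : List Char) :
    PySem.Chars.stripChars
        ((PySem.Chars.splitOn cs [',']).foldl
          (fun acc c => acc ++ pvDefCat ++ c ++ [',']) ([] : List Char)) [',']
      = pvDefCat ++ PySem.Chars.replace cs [','] (',' :: pvDefCat) := by
  rw [pvSplitOn_char, pvReplace_char]
  simp only [List.append_assoc]
  rw [PySem.List.foldl_append_eq_flatMap (fun c => pvDefCat ++ (c ++ [','])) ((pvSC cs).1 :: (pvSC cs).2) ([] : List Char)]
  rw [List.nil_append, pvFlatten_pieces pvDefCat (pvSC cs).2 (pvSC cs).1]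
  have hX : pvDefCat ++ ((pvSC cs).1 ++ ((pvSC cs).2.map (fun q => (',' :: pvDefCat) ++ q)).flatten)
      = pvDefCat ++ pvRepl (',' :: pvDefCat) cs := by
    rw [pvRepl_eq_sC]
  rw [hX]
  apply pvStrip_append_comma
  · intro c hc
    rw [show pvDefCat = 'D' :: "efault Category/".toList from by decide, List.cons_append] at hc
    simp only [List.head?_cons, Option.some.injEq] at hc
    subst hc
    decide
  · exact pvEndsOk_append cs pvDefCat ⟨"Default Category".toList, '/', by decide, by decide⟩

-- ===== VERDICT (by name: the statement is the Claim_ definition above) =====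
theorem update_category_spec : Claim_equal_update_category := by
  intro row _ _
  unfold Spec_update_category update_category update_category_alt
  cases h : (PySem.Dict.mk row).get? "categories" with
  | none => rfl
  | some s =>
    simp only []
    rw [pvCore]
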